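-- pv_equiv track=rewrite | github.com/jenniferweiliu/blind-date-matcher | matcher_api.py | is_compatible_orientation
-- ===== SOURCE A (Python) =====
-- def is_compatible_orientation(person1, person2):
--     """Check if two people are compatible based on gender and interested in."""
--     gender1 = str(person1.get('gender', '')).lower().strip()
--     gender2 = str(person2.get('gender', '')).lower().strip()
--
--     interested1_raw = str(person1.get('interested_in', '')).lower()
--     interested2_raw = str(person2.get('interested_in', '')).lower()
--
--     interested1 = [x.strip() for x in interested1_raw.split(',')]
--     interested2 = [x.strip() for x in interested2_raw.split(',')]
--
--     # Check if person1 is interested in person2's gender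
--     person1_interested = False
--     if 'men' in interested1 and gender2 == 'man':
--         person1_interested = True
--     elif 'women' in interested1 and gender2 == 'woman':
--         person1_interested = True
--     elif 'other' in interested1 and (gender2 == 'non-binary' or gender2 == 'other'):
--         person1_interested = True
--
--     if not person1_interested:
--         return False
--
--     # Check if person2 is interested in person1's gender
--     person2_interested = False
--     if 'men' in interested2 and gender1 == 'man':
--         person2_interested = True
--     elif 'women' in interested2 and gender1 == 'woman':
--         person2_interested = True
--     elif 'other' in interested2 and (gender1 == 'non-binary' or gender1 == 'other'):
--         person2_interested = True
--
--     if not person2_interested: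
--         return False
--
--     return True
-- ===== SOURCE B (Python) =====
-- def _gender(person):
--     return str(person.get('gender', '')).lower().strip()
--
--
-- def _attracted_genders(person):
--     """Expand the person's interest tokens into the set of genders they denote."""
--     genders = set()
--     for token in str(person.get('interested_in', '')).lower().split(','):
--         t = token.strip()
--         if t == 'men':
--             genders.add('man')
--         elif t == 'women':
--             genders.add('woman')
--         elif t == 'other':
--             genders.add('non-binary')
--             genders.add('other')
--     return genders
--
--
-- def is_compatible_orientation(person1, person2):
--     return _gender(person2) in _attracted_genders(person1) and \
--         _gender(person1) in _attracted_genders(person2)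
-- ===== Notes on version B (the rewrite author's own statement) =====
-- stated objective: alternative
-- what changed: Inverts the direction of the check: instead of A's guarded elif cascade testing whether the required interest token occurs in the interest list, B folds over the interest tokens expanding each token into the set of genders it denotes ('men'->{'man'}, 'women'->{'woman'}, 'other'->{'non-binary','other'}) and then answers with two set-membership tests of the partner's gender.
import Mathlib
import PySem

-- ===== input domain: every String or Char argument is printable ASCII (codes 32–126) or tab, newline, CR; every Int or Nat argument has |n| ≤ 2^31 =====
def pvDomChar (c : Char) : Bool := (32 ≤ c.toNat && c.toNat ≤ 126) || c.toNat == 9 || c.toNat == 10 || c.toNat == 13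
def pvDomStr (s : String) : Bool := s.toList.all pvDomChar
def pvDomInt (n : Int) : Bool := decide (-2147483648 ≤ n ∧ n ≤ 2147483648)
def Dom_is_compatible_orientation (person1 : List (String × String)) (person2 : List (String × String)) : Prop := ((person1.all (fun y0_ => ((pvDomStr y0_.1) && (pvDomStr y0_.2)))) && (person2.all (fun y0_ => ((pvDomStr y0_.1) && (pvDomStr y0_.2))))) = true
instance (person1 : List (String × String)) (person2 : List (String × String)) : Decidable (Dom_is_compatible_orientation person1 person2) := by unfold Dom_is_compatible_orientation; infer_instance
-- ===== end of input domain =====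

-- B inverts A's check: it expands each interest token into the genders it denotes,
-- accumulating an attracted-to set, then tests the partner's gender; objective: alternative.

-- dict.get(k, '') on an association list: first matching key, else the default
def pvGet (person : List (String × String)) (k : String) : String :=
  ((person.find? (fun kv => kv.1 == k)).map (fun kv => kv.2)).getD ""

-- ===== PORT A =====
def is_compatible_orientation (person1 : List (String × String)) (person2 : List (String × String)) : Bool :=
  let gender1 := PySem.Str.strip (PySem.Str.lower (pvGet person1 "gender"))
  let gender2 := PySem.Str.strip (PySem.Str.lower (pvGet person2 "gender"))
  let interested1_raw := PySem.Str.lower (pvGet person1 "interested_in")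
  let interested2_raw := PySem.Str.lower (pvGet person2 "interested_in")
  let interested1 := (((PySem.Str.split? interested1_raw ",").getD [])).map PySem.Str.strip
  let interested2 := (((PySem.Str.split? interested2_raw ",").getD [])).map PySem.Str.strip
  let person1_interested :=
    if interested1.contains "men" && gender2 == "man" then true
    else if interested1.contains "women" && gender2 == "woman" then true
    else if interested1.contains "other" && (gender2 == "non-binary" || gender2 == "other") then true
    else false
  if !person1_interested then false
  else
    let person2_interested :=
      if interested2.contains "men" && gender1 == "man" then true
      else if interested2.contains "women" && gender1 == "woman" then true
      else if interested2.contains "other" && (gender1 == "non-binary" || gender1 == "other") then true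
      else false
    if !person2_interested then false
    else true

-- ===== PORT B =====
def pvGender (person : List (String × String)) : String :=
  PySem.Str.strip (PySem.Str.lower (pvGet person "gender"))

-- one loop step: expand a (stripped) interest token into the genders it denotes
def pvExpandStep (s : PySem.Set String) (t : String) : PySem.Set String :=
  if t == "men" then PySem.Set.add s "man"
  else if t == "women" then PySem.Set.add s "woman"
  else if t == "other" then PySem.Set.add (PySem.Set.add s "non-binary") "other"
  else s

def pvAttractedGenders (person : List (String × String)) : PySem.Set String :=
  ((PySem.Str.split? (PySem.Str.lower (pvGet person "interested_in")) ",").getD []).foldl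
    (fun s token => pvExpandStep s (PySem.Str.strip token)) PySem.Set.empty

def is_compatible_orientation_alt (person1 : List (String × String)) (person2 : List (String × String)) : Bool :=
  PySem.Set.contains (pvAttractedGenders person1) (pvGender person2) &&
  PySem.Set.contains (pvAttractedGenders person2) (pvGender person1)

-- ===== PRECONDITION & SPEC =====
def Spec_is_compatible_orientation (person1 : List (String × String)) (person2 : List (String × String)) (out : Bool) : Prop := out = is_compatible_orientation_alt person1 person2
instance (person1 : List (String × String)) (person2 : List (String × String)) (out : Bool) : Decidable (Spec_is_compatible_orientation person1 person2 out) := by unfold Spec_is_compatible_orientation; infer_instance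

-- ===== CLAIM (what is proved, stated in full; the proofs are below) =====
def Claim_equal_is_compatible_orientation : Prop := ∀ (person1 : List (String × String)) (person2 : List (String × String)), Dom_is_compatible_orientation person1 person2 → Spec_is_compatible_orientation person1 person2 (is_compatible_orientation person1 person2)

-- ===== LEMMAS AND PROOFS =====
-- Characterise membership in the expanded set.
theorem mem_expand_fold (l : List String) (s : PySem.Set String) (g : String) :
    (g ∈ l.foldl pvExpandStep s) ↔
      g ∈ s ∨ (g = "man" ∧ "men" ∈ l) ∨ (g = "woman" ∧ "women" ∈ l) ∨
        ((g = "non-binary" ∨ g = "other") ∧ "other" ∈ l) := by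
  induction l generalizing s with
  | nil => simp
  | cons t ts ih =>
    simp only [List.foldl_cons, ih, pvExpandStep, List.mem_cons]
    by_cases h1 : t = "men"
    · subst h1; simp [PySem.Set.mem_add]; tauto
    · by_cases h2 : t = "women"
      · subst h2; simp [PySem.Set.mem_add]; tauto
      · by_cases h3 : t = "other"
        · subst h3; simp [PySem.Set.mem_add]; tauto
        · simp [h1, h2, h3, Ne.symm h1, Ne.symm h2, Ne.symm h3]

-- A's elif cascade over the stripped tokens equals B's set-membership test.
theorem chain_eq_mem (l : List String) (g : String) :
    (if l.contains "men" && g == "man" then true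
     else if l.contains "women" && g == "woman" then true
     else if l.contains "other" && (g == "non-binary" || g == "other") then true
     else false) = PySem.Set.contains (l.foldl pvExpandStep PySem.Set.empty) g := by
  have hmem := mem_expand_fold l PySem.Set.empty g
  simp only [PySem.Set.empty] at hmem
  by_cases h1 : g = "man"
  · subst h1; simp [PySem.Set.contains, hmem]
  · by_cases h2 : g = "woman"
    · subst h2; simp [PySem.Set.contains, hmem]
    · by_cases h3 : g = "non-binary"
      · subst h3; simp [PySem.Set.contains, hmem]
      · by_cases h4 : g = "other"
        · subst h4; simp [PySem.Set.contains, hmem]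
        · simp [PySem.Set.contains, hmem, h1, h2, h3, h4]

-- ===== VERDICT (by name: the statement is the Claim_ definition above) =====
theorem is_compatible_orientation_spec : Claim_equal_is_compatible_orientation := by
  intro person1 person2 _
  show is_compatible_orientation person1 person2 = is_compatible_orientation_alt person1 person2
  simp only [is_compatible_orientation, is_compatible_orientation_alt, pvGender,
    pvAttractedGenders, ← List.foldl_map (f := PySem.Str.strip) (g := pvExpandStep)]
  rw [chain_eq_mem, chain_eq_mem]
  cases PySem.Set.contains
      ((((PySem.Str.split? (PySem.Str.lower (pvGet person1 "interested_in")) ",").getD [])).map PySem.Str.strip |>.foldl pvExpandStep PySem.Set.empty)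
      (PySem.Str.strip (PySem.Str.lower (pvGet person2 "gender"))) <;>
    cases PySem.Set.contains
      ((((PySem.Str.split? (PySem.Str.lower (pvGet person2 "interested_in")) ",").getD [])).map PySem.Str.strip |>.foldl pvExpandStep PySem.Set.empty)
      (PySem.Str.strip (PySem.Str.lower (pvGet person1 "gender"))) <;> simp
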